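-- pv_equiv track=rewrite | github.com/muskan422/lab-eval1 | q2.py | count_v
-- ===== SOURCE A (Python) =====
-- def count_v(text):
--     vowels = 'aeiouAEIOU'
--     vowel_c = 0
--     unique_v = set()
--
--     for char in text:
--         if char in vowels:
--             vowel_c += 1
--             unique_v.add(char.lower())
--
--     return vowel_c, unique_v
-- ===== SOURCE B (Python) =====
-- def count_v(text):
--     # One counting pass over the text into a frequency table, then a scan of
--     # the fixed vowel alphabet against that table; uniques via a comprehension.
--     counts = {}
--     for ch in text:
--         counts[ch] = counts.get(ch, 0) + 1
--     vowel_c = sum(counts.get(v, 0) for v in 'aeiouAEIOU')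
--     unique_v = {ch.lower() for ch in text if ch in 'aeiouAEIOU'}
--     return vowel_c, unique_v
-- ===== Notes on version B (the rewrite author's own statement) =====
-- stated objective: alternative
-- what changed: B builds a character frequency table in one pass and then sums counts by scanning the fixed vowel alphabet against the table (and collects uniques with a set comprehension), instead of A's single text scan with a per-character membership test and two mutable accumulators.
import Mathlib
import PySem

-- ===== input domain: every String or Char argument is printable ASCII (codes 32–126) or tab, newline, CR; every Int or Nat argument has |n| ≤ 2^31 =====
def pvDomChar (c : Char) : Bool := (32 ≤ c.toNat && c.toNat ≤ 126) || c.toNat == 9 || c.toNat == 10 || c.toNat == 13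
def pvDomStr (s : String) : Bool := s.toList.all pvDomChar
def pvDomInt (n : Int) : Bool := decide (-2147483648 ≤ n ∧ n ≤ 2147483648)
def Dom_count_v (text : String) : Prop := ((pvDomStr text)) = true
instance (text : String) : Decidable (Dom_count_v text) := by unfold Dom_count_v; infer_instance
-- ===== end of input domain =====

-- B replaces A's single text scan (membership test + two accumulators) by a frequency
-- table built once and a scan of the fixed vowel alphabet; same values on every input.

-- ===== PORT A =====
-- 'char.lower()' on a one-character string
def pvLower1 (c : Char) : String := PySem.Str.lower (String.ofList [c])

def count_v (text : String) : Int × List String :=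
  text.toList.foldl
    (fun (acc : Int × PySem.Set String) (char : Char) =>
      if ("aeiouAEIOU".toList).contains char then
        (acc.1 + 1, PySem.Set.add acc.2 (pvLower1 char))
      else acc)
    ((0 : Int), PySem.Set.empty)

-- ===== PORT B =====
def count_v_alt (text : String) : Int × List String :=
  let counts : PySem.Dict Char Int :=
    text.toList.foldl (fun d ch => d.insert ch (d.getD ch 0 + 1)) PySem.Dict.empty
  let vowel_c : Int := (("aeiouAEIOU".toList).map (fun v => counts.getD v 0)).sum
  let unique_v : PySem.Set String :=
    PySem.Set.ofList ((text.toList.filter (fun ch => ("aeiouAEIOU".toList).contains ch)).map pvLower1)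
  (vowel_c, unique_v)

-- ===== PRECONDITION & SPEC =====
def Spec_count_v (text : String) (out : Int × List String) : Prop := out = count_v_alt text
instance (text : String) (out : Int × List String) : Decidable (Spec_count_v text out) := by unfold Spec_count_v; infer_instance

-- ===== CLAIM (what is proved, stated in full; the proofs are below) =====
def Claim_equal_count_v : Prop := ∀ (text : String), Dom_count_v text → Spec_count_v text (count_v text)

-- ===== LEMMAS AND PROOFS =====

-- sum over a duplicate-free list of 0/1 indicators is the membership indicator
theorem pv_sum_indicator (c : Char) (V : List Char) (h : V.Nodup) :
    (V.map (fun v => if c = v then (1 : Int) else 0)).sum = if c ∈ V then 1 else 0 := by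
  induction V with
  | nil => simp
  | cons v V ih =>
    rcases List.nodup_cons.mp h with ⟨hv, hV⟩
    simp only [List.map_cons, List.sum_cons, ih hV, List.mem_cons]
    by_cases hc : c = v
    · subst hc; simp [hv]
    · simp [hc]

-- count on a cons, as integers
theorem pv_count_cons (c : Char) (l : List Char) (v : Char) :
    ((c :: l).count v : Int) = (l.count v : Int) + (if c = v then 1 else 0) := by
  by_cases hv : c = v
  · subst hv; simp
  · simp [hv]

theorem pv_map_sum_split (c : Char) (l : List Char) (V : List Char) :
    (V.map (fun v => ((c :: l).count v : Int))).sum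
      = (V.map (fun v => (l.count v : Int))).sum
        + (V.map (fun v => if c = v then (1 : Int) else 0)).sum := by
  induction V with
  | nil => simp
  | cons v V ihV =>
    simp only [List.map_cons, List.sum_cons, ihV, pv_count_cons c l v]
    ring

-- summing the counts of the (duplicate-free) vowel alphabet equals counting vowel positions
theorem pv_sum_counts (V : List Char) (h : V.Nodup) (l : List Char) :
    (V.map (fun v => (l.count v : Int))).sum = (l.countP (fun c => V.contains c) : Int) := by
  induction l with
  | nil => simp
  | cons c l ih =>
    rw [pv_map_sum_split, ih, pv_sum_indicator c V h, List.countP_cons]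
    by_cases hc : c ∈ V
    · have : V.contains c = true := List.contains_iff_mem.mpr hc
      rw [this]
      simp [hc]
    · have : ¬ V.contains c = true := by simpa [List.contains_iff_mem] using hc
      rw [if_neg this]
      simp [hc]

-- characterization of A's fold
theorem pv_foldA (l : List Char) (n : Int) (s : PySem.Set String) :
    l.foldl
      (fun (acc : Int × PySem.Set String) (char : Char) =>
        if ("aeiouAEIOU".toList).contains char then
          (acc.1 + 1, PySem.Set.add acc.2 (pvLower1 char))
        else acc) (n, s)
    = (n + (l.countP (fun c => ("aeiouAEIOU".toList).contains c) : Int),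
       PySem.Set.update s ((l.filter (fun c => ("aeiouAEIOU".toList).contains c)).map pvLower1)) := by
  induction l generalizing n s with
  | nil => simp [PySem.Set.update]
  | cons c l ih =>
    simp only [List.foldl_cons]
    by_cases hc : ("aeiouAEIOU".toList).contains c = true
    · rw [if_pos hc, ih, List.countP_cons, List.filter_cons_of_pos hc, List.map_cons,
        if_pos hc]
      simp only [PySem.Set.update, List.foldl_cons, Prod.mk.injEq]
      exact ⟨by push_cast; ring, trivial⟩
    · rw [if_neg hc, ih, List.countP_cons, List.filter_cons_of_neg hc, if_neg hc]
      simp only [Prod.mk.injEq]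
      exact ⟨by push_cast; ring, trivial⟩

-- ===== VERDICT (by name: the statement is the Claim_ definition above) =====
theorem count_v_spec : Claim_equal_count_v := by
  intro text _
  show count_v text = count_v_alt text
  unfold count_v count_v_alt
  rw [pv_foldA]
  have hnodup : ("aeiouAEIOU".toList).Nodup := by decide
  have hcounts : ∀ v : Char,
      (text.toList.foldl (fun d ch => d.insert ch (d.getD ch 0 + 1)) PySem.Dict.empty).getD v 0
        = (text.toList.count v : Int) := by
    intro v
    rw [PySem.Dict.getD_foldl_insert_add_one]
    simp [PySem.Dict.empty, PySem.Dict.getD, PySem.Dict.get?]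
  simp only [hcounts, pv_sum_counts _ hnodup, PySem.Set.update_nil_left, PySem.Set.empty,
    zero_add]
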